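-- pv_equiv track=rewrite | github.com/ajmarin/coding | leetcode/02044_count_number_of_maximum_bitwise_or_subsets.py | countMaxOrSubsets
-- ===== SOURCE A (Python) =====
-- from typing import List
--
-- def countMaxOrSubsets(nums: List[int]) -> int:
--     N = len(nums)
--
--     best = 0
--     for n in nums: best |= n
--
--     def bt(i, curr):
--         if i == N: return curr == best
--         return bt(i + 1, curr) + bt(i + 1, curr | nums[i])
--
--     return bt(0, 0)
-- ===== SOURCE B (Python) =====
-- from typing import List
--
-- def countMaxOrSubsets(nums: List[int]) -> int:
--     best = 0
--     for n in nums: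
--         best |= n
--     counts = {0: 1}
--     for n in nums:
--         for v, c in list(counts.items()):
--             counts[v | n] = counts.get(v | n, 0) + c
--     return counts.get(best, 0)
-- ===== Notes on version B (the rewrite author's own statement) =====
-- stated objective: faster
-- what changed: Replaced the O(2^N) backtracking recursion with a one-pass DP over a dict mapping each reachable OR value to the number of subsets producing it, reading off the count at the maximum OR; Pre_ excludes the empty list, on which A returns the bool True instead of an int.
-- outside the precondition, e.g. on countMaxOrSubsets([]): A returns True, B returns 1
import Mathlib
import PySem

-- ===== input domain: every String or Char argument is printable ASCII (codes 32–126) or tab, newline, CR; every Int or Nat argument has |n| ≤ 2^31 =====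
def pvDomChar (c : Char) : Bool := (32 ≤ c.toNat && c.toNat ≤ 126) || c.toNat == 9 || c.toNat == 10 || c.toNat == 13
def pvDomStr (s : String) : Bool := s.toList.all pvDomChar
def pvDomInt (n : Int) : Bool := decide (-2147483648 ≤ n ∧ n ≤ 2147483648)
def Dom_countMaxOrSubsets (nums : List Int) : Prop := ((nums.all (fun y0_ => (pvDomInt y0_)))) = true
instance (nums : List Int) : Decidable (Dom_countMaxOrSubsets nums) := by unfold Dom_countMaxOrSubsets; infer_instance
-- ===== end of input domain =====

-- B replaces A's O(2^N) backtracking with a DP over a dict of OR-value counts (objective: faster).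
-- Pre_ excludes the empty list, where Python A returns the bool True (not an int).

-- ===== PORT A =====
-- bt(i, curr): recursion over the suffix nums[i:], transliterated as structural recursion on that suffix
def pvBtA (best : Int) : List Int → Int → Int
  | [], curr => if curr == best then 1 else 0
  | n :: t, curr => pvBtA best t curr + pvBtA best t (PySem.Int.bor curr n)

def countMaxOrSubsets (nums : List Int) : Int :=
  let best := nums.foldl (fun b n => PySem.Int.bor b n) 0
  pvBtA best nums 0

-- ===== PORT B =====
-- inner loop: for v, c in list(counts.items()): counts[v|n] = counts.get(v|n, 0) + c
def pvStepB (n : Int) (d : PySem.Dict Int Int) : PySem.Dict Int Int :=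
  d.items.foldl
    (fun acc p =>
      acc.insert (PySem.Int.bor p.1 n) (acc.getD (PySem.Int.bor p.1 n) 0 + p.2)) d

def countMaxOrSubsets_alt (nums : List Int) : Int :=
  let best := nums.foldl (fun b n => PySem.Int.bor b n) 0
  let counts := nums.foldl (fun d n => pvStepB n d) (PySem.Dict.ofList [((0 : Int), (1 : Int))])
  counts.getD best 0

-- ===== PRECONDITION & SPEC =====
-- Pre_ excludes only the empty list, on which A returns the bool True rather than an int (outside the declared return type).
def Pre_countMaxOrSubsets (nums : List Int) : Prop := nums ≠ []
instance (nums : List Int) : Decidable (Pre_countMaxOrSubsets nums) := by unfold Pre_countMaxOrSubsets; infer_instance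
def pvWitness_countMaxOrSubsets : List Int := [1, 2]

def Spec_countMaxOrSubsets (nums : List Int) (out : Int) : Prop := out = countMaxOrSubsets_alt nums
instance (nums : List Int) (out : Int) : Decidable (Spec_countMaxOrSubsets nums out) := by unfold Spec_countMaxOrSubsets; infer_instance

-- ===== CLAIM (what is proved, stated in full; the proofs are below) =====
def Claim_equal_countMaxOrSubsets : Prop := ∀ (nums : List Int), Dom_countMaxOrSubsets nums → Pre_countMaxOrSubsets nums → Spec_countMaxOrSubsets nums (countMaxOrSubsets nums)

-- ===== LEMMAS AND PROOFS =====

-- weighted sum Σ c * f v over an item list / a dict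
def pvWl (l : List (Int × Int)) (f : Int → Int) : Int :=
  (l.map (fun p => p.2 * f p.1)).sum

def pvWeight (d : PySem.Dict Int Int) (f : Int → Int) : Int := pvWl d.items f

theorem pvWl_add (l : List (Int × Int)) (f g : Int → Int) :
    pvWl l (fun v => f v + g v) = pvWl l f + pvWl l g := by
  induction l with
  | nil => simp [pvWl]
  | cons p t ih =>
      simp only [pvWl, List.map_cons, List.sum_cons] at ih ⊢
      rw [ih]; ring

-- replacing the unique item with key k by (k, w) changes the weight by (w - x) * f k
theorem pvWl_replace (l : List (Int × Int)) (k x w : Int) (f : Int → Int)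
    (hnd : (l.map (·.1)).Nodup) (hmem : (k, x) ∈ l) :
    pvWl (l.map (fun p => if p.1 == k then (k, w) else p)) f = pvWl l f - x * f k + w * f k := by
  induction l with
  | nil => simp at hmem
  | cons p t ih =>
      obtain ⟨a, b⟩ := p
      simp only [List.map_cons, List.nodup_cons] at hnd
      rcases List.mem_cons.mp hmem with h | h
      · cases h
        have hrest : t.map (fun p => if p.1 == k then (k, w) else p) = t := by
          have h1 : t.map (fun p => if p.1 == k then (k, w) else p) = t.map id :=
            List.map_congr_left (fun q hq => by
              have : q.1 ≠ k := by
                intro he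
                exact hnd.1 (by rw [← he]; exact List.mem_map_of_mem (f := fun x => x.1) hq)
              simp [this])
          simpa using h1
        simp only [List.map_cons, beq_self_eq_true, if_true, hrest, pvWl, List.sum_cons]
        ring
      · have hne : a ≠ k := by
          intro he; subst he
          exact hnd.1 (by simpa using List.mem_map_of_mem (f := (·.1)) h)
        have hif : ((a, b).1 == k) = false := by simp [hne]
        have ht := ih hnd.2 h
        simp only [pvWl, List.map_cons, List.sum_cons, hif, Bool.false_eq_true, if_false] at ht ⊢
        rw [ht]; ring

-- W1: inserting k ↦ (getD k 0 + c) adds c * f k to the weight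
theorem pvWeight_insert_add (d : PySem.Dict Int Int) (k c : Int) (f : Int → Int)
    (hnd : d.keys.Nodup) :
    pvWeight (d.insert k (d.getD k 0 + c)) f = pvWeight d f + c * f k := by
  by_cases hc : d.contains k = true
  · obtain ⟨x, hx⟩ : ∃ x, d.get? k = some x := by
      rcases h : d.get? k with _ | x
      · rw [PySem.Dict.contains_eq_isSome_get?, h] at hc; simp at hc
      · exact ⟨x, rfl⟩
    have hgd : d.getD k 0 = x := PySem.Dict.getD_of_get?_eq_some _ _ hx
    have hmem : (k, x) ∈ d.items := PySem.Dict.mem_items_of_get?_eq_some _ hx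
    have hitems := PySem.Dict.items_insert_of_contains (d := d) (k := k)
      (v := d.getD k 0 + c) hc
    unfold pvWeight
    rw [hitems, pvWl_replace d.items k x (d.getD k 0 + c) f hnd hmem, hgd]
    ring
  · have h0 : d.getD k 0 = 0 := PySem.Dict.getD_of_not_contains _ _ (by simpa using hc)
    have hitems := PySem.Dict.items_insert_of_not_contains (d := d) (k := k)
      (v := d.getD k 0 + c) (by simpa using hc)
    unfold pvWeight
    rw [hitems]
    simp [pvWl, h0]

-- keys stay nodup through the scatter loop
theorem pvNodup_foldl_insert (items : List (Int × Int)) (n : Int) (d : PySem.Dict Int Int)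
    (hnd : d.keys.Nodup) :
    ((items.foldl
      (fun acc p =>
        acc.insert (PySem.Int.bor p.1 n) (acc.getD (PySem.Int.bor p.1 n) 0 + p.2)) d).keys).Nodup := by
  induction items generalizing d with
  | nil => simpa using hnd
  | cons p t ih =>
      simp only [List.foldl_cons]
      exact ih _ (PySem.Dict.nodup_keys_insert _ _ _ hnd)

theorem pvNodup_stepB (n : Int) (d : PySem.Dict Int Int) (hnd : d.keys.Nodup) :
    (pvStepB n d).keys.Nodup := pvNodup_foldl_insert d.items n d hnd

-- scatter: folding the inner loop over any snapshot list adds Σ c * f (v|n)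
theorem pvWeight_scatter (items : List (Int × Int)) (n : Int) (d : PySem.Dict Int Int)
    (f : Int → Int) (hnd : d.keys.Nodup) :
    pvWeight (items.foldl
      (fun acc p =>
        acc.insert (PySem.Int.bor p.1 n) (acc.getD (PySem.Int.bor p.1 n) 0 + p.2)) d) f
      = pvWeight d f + pvWl items (fun v => f (PySem.Int.bor v n)) := by
  induction items generalizing d with
  | nil => simp [pvWl]
  | cons p t ih =>
      simp only [List.foldl_cons]
      rw [ih _ (PySem.Dict.nodup_keys_insert _ _ _ hnd),
        pvWeight_insert_add d (PySem.Int.bor p.1 n) p.2 f hnd]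
      simp [pvWl, List.map_cons, List.sum_cons]; ring

-- W3: one outer-loop step
theorem pvWeight_stepB (n : Int) (d : PySem.Dict Int Int) (f : Int → Int)
    (hnd : d.keys.Nodup) :
    pvWeight (pvStepB n d) f = pvWeight d f + pvWeight d (fun v => f (PySem.Int.bor v n)) := by
  unfold pvStepB
  exact pvWeight_scatter d.items n d f hnd

-- W4: a lookup is the weight of the indicator function
theorem pvSum_indicator (keys : List Int) (g : Int → Int) (w : Int) (hnd : keys.Nodup) :
    (keys.map (fun k => g k * (if k == w then 1 else 0))).sum
      = if w ∈ keys then g w else 0 := by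
  induction keys with
  | nil => simp
  | cons k t ih =>
      simp only [List.nodup_cons] at hnd
      simp only [List.map_cons, List.sum_cons]
      rw [ih hnd.2]
      by_cases hk : k = w
      · subst hk; simp [hnd.1]
      · simp [hk, show w ≠ k from fun h => hk h.symm]

theorem pvGetD_eq_weight (d : PySem.Dict Int Int) (w : Int) (hnd : d.keys.Nodup) :
    d.getD w 0 = pvWeight d (fun v => if v == w then 1 else 0) := by
  unfold pvWeight pvWl
  rw [PySem.Dict.items_eq_map_keys d hnd 0, List.map_map]
  simp only [Function.comp_def]
  rw [pvSum_indicator d.keys (fun k => d.getD k 0) w hnd]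
  by_cases hw : w ∈ d.keys
  · simp [hw]
  · have hc : d.contains w = false := by
      rcases h : d.contains w with _ | _
      · rfl
      · exact absurd ((PySem.Dict.contains_iff_mem_keys d w).mp h) hw
    simp [hw, PySem.Dict.getD_of_not_contains _ _ hc]

-- nodup keys after the whole outer loop
theorem pvNodup_process (l : List Int) (d : PySem.Dict Int Int) (hnd : d.keys.Nodup) :
    ((l.foldl (fun d n => pvStepB n d) d).keys).Nodup := by
  induction l generalizing d with
  | nil => simpa using hnd
  | cons n t ih => exact ih _ (pvNodup_stepB n d hnd)

-- MAIN: the DP's weight under any indicator equals the weight of A's backtracking counts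
theorem pvMain (w : Int) (l : List Int) (d : PySem.Dict Int Int) (hnd : d.keys.Nodup) :
    pvWeight (l.foldl (fun d n => pvStepB n d) d) (fun v => if v == w then 1 else 0)
      = pvWeight d (fun v => pvBtA w l v) := by
  induction l generalizing d with
  | nil => simp [pvBtA]
  | cons n t ih =>
      simp only [List.foldl_cons]
      rw [ih _ (pvNodup_stepB n d hnd), pvWeight_stepB n d _ hnd]
      unfold pvWeight
      rw [← pvWl_add]
      rfl

-- ===== VERDICT (by name: the statement is the Claim_ definition above) =====
theorem countMaxOrSubsets_spec : Claim_equal_countMaxOrSubsets := by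
  intro nums _ _
  unfold Spec_countMaxOrSubsets countMaxOrSubsets countMaxOrSubsets_alt
  set best := nums.foldl (fun b n => PySem.Int.bor b n) 0 with hbest
  have hnd0 : (PySem.Dict.ofList [((0 : Int), (1 : Int))]).keys.Nodup := by decide
  rw [pvGetD_eq_weight _ best (pvNodup_process nums _ hnd0),
    pvMain best nums _ hnd0]
  have hit : (PySem.Dict.ofList [((0 : Int), (1 : Int))]).items = [((0 : Int), (1 : Int))] := rfl
  simp [pvWeight, pvWl, hit]
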